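-- pv_equiv track=rewrite | github.com/akvatol/BioHack2019 | src/tripep.py | pair_creator
-- ===== SOURCE A (Python) =====
-- def pair_creator(first_pep: str, second_pep: str):
--     """
--     Принимает на вход два пептида и возвращает все возможные пары
--     комбинаций с помощью которых их можно соединить
--     """
--     all_pairs = []
--     min_intersec = min((len(first_pep), len(second_pep)))
--
--     for i in range(1, min_intersec):
--         if second_pep.endswith(first_pep[:i]):
--             all_pairs.append(''.join([str(x) for x in range(i)]) + ''.join([
--                 str(x)
--                 for x in reversed(range(len(second_pep) - i, len(second_pep)))
--             ]))
--
--         # if first_pep.endswith(second_pep[:i]):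
--         #     all_pairs.append(''.join([
--         #         str(x)
--         #         for x in reversed(range(len(first_pep) - i, len(first_pep)))
--         #     ]) + ''.join([str(x) for x in range(i)]))
--
--     return all_pairs
-- ===== SOURCE B (Python) =====
-- def pair_creator(first_pep: str, second_pep: str):
--     """KMP: one prefix-function pass finds every overlap length i where second_pep
--     ends with first_pep[:i]; labels are then built for those lengths."""
--     n1, n2 = len(first_pep), len(second_pep)
--     m = min(n1, n2)
--     s = first_pep + "\x00" + second_pep
--     # prefix function of s
--     pi = [0] * len(s)
--     k = 0
--     for i in range(1, len(s)):
--         while k > 0 and s[i] != s[k]: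
--             k = pi[k - 1]
--         if s[i] == s[k]:
--             k += 1
--         pi[i] = k
--     # border chain of s = all overlap lengths, descending
--     lengths = []
--     k = pi[len(s) - 1]
--     while k > 0:
--         if k < m:
--             lengths.append(k)
--         k = pi[k - 1]
--     return [''.join([str(x) for x in range(i)]) + ''.join([
--         str(x) for x in reversed(range(n2 - i, n2))
--     ]) for i in reversed(lengths)]
-- ===== Notes on version B (the rewrite author's own statement) =====
-- stated objective: alternative
-- what changed: Replaces the loop that slices first_pep and calls endswith for every candidate length with a single KMP prefix-function pass over first_pep + sentinel + second_pep whose border chain yields all overlap lengths at once.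
import Mathlib
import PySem

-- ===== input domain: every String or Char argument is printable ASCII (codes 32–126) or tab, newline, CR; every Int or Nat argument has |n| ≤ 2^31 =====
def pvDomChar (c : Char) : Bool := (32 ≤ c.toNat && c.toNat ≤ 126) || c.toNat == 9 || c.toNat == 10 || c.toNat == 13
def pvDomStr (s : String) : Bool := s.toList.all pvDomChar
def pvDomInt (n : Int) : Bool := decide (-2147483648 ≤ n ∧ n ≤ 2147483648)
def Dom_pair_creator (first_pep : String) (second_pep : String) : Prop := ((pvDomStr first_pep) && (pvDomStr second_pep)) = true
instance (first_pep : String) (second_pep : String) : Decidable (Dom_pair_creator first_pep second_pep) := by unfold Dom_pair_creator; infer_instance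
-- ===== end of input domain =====

-- B replaces A's per-length slice-and-endswith scan by one KMP prefix-function pass over
-- first_pep + '\x00' + second_pep whose border chain yields all overlap lengths (objective: alternative).

-- ===== PORT A =====
-- label built for overlap length i: ''.join(str(x) for x in range(i)) + ''.join(str(x) for x in reversed(range(n2-i, n2)))
def pvLabel (n2 : Int) (i : Int) : String :=
  PySem.Str.join "" ((PySem.List.pyRange 0 i 1).map (fun x => PySem.Int.toStr x)) ++
  PySem.Str.join "" ((PySem.List.pyRange (n2 - i) n2 1).reverse.map (fun x => PySem.Int.toStr x))

def pair_creator (first_pep : String) (second_pep : String) : List String :=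
  let min_intersec := min (PySem.Str.len first_pep) (PySem.Str.len second_pep)
  (PySem.List.pyRange 1 min_intersec 1).foldl
    (fun all_pairs i =>
      if PySem.Str.endswith second_pep (PySem.Str.slice first_pep none (some i)) = true then
        all_pairs ++ [pvLabel (PySem.Str.len second_pep) i]
      else all_pairs) []

-- ===== PORT B =====
-- the KMP while-loop 'while k > 0 and s[i] != s[k]: k = pi[k-1]' (fuel k suffices: k strictly decreases)
def pvBShrink (s : List Char) (pi : List Nat) (c : Char) : Nat → Nat → Nat
  | 0, k => k
  | fuel+1, k => if 0 < k ∧ s.getD k ' ' ≠ c then pvBShrink s pi c fuel (pi.getD (k-1) 0) else k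

def pvBStep (s : List Char) (st : List Nat × Nat) (i : Nat) : List Nat × Nat :=
  let k1 := pvBShrink s st.1 (s.getD i ' ') st.2 st.2
  let k2 := if s.getD i ' ' = s.getD k1 ' ' then k1 + 1 else k1
  (st.1 ++ [k2], k2)

-- prefix-function table: pi[i] = longest proper border of s[:i+1]
def pvBTable (s : List Char) : List Nat :=
  ((List.range' 1 (s.length - 1)).foldl (pvBStep s) ([0], 0)).1

-- 'while k > 0: if k < m: lengths.append(k); k = pi[k-1]' (fuel k suffices: k strictly decreases)
def pvBCollect (pi : List Nat) (m : Nat) : Nat → Nat → List Nat → List Nat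
  | 0, _, acc => acc
  | fuel+1, k, acc =>
    if 0 < k then
      pvBCollect pi m fuel (pi.getD (k-1) 0) (if k < m then acc ++ [k] else acc)
    else acc

def pair_creator_alt (first_pep : String) (second_pep : String) : List String :=
  let n2 := second_pep.toList.length
  let m := min first_pep.toList.length n2
  let s := first_pep.toList ++ '\x00' :: second_pep.toList
  let pi := pvBTable s
  let k0 := pi.getD (s.length - 1) 0
  let lengths := pvBCollect pi m k0 k0 []
  lengths.reverse.map (fun (i : Nat) => pvLabel (n2 : Int) (i : Int))

-- ===== PRECONDITION & SPEC =====
def Spec_pair_creator (first_pep : String) (second_pep : String) (out : List String) : Prop := out = pair_creator_alt first_pep second_pep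
instance (first_pep : String) (second_pep : String) (out : List String) : Decidable (Spec_pair_creator first_pep second_pep out) := by unfold Spec_pair_creator; infer_instance

-- ===== CLAIM (what is proved, stated in full; the proofs are below) =====
def Claim_equal_pair_creator : Prop := ∀ (first_pep : String) (second_pep : String), Dom_pair_creator first_pep second_pep → Spec_pair_creator first_pep second_pep (pair_creator first_pep second_pep)

-- ===== LEMMAS AND PROOFS =====

-- pvMB t = length of the longest proper border of t (longest k < |t| with t.take k a suffix)
def pvMB (t : List Char) : Nat := Nat.findGreatest (fun k => t.take k <:+ t) (t.length - 1)

theorem pvMB_le (t : List Char) : pvMB t ≤ t.length - 1 := Nat.findGreatest_le _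

theorem pvMB_lt (t : List Char) (ht : t ≠ []) : pvMB t < t.length := by
  have h1 := pvMB_le t
  have h2 : 0 < t.length := List.length_pos_of_ne_nil ht
  omega

theorem pvMB_border (t : List Char) : t.take (pvMB t) <:+ t := by
  unfold pvMB
  exact Nat.findGreatest_spec (P := fun k => List.take k t <:+ t) (m := 0) (Nat.zero_le _) (by simp [List.nil_suffix])

theorem pv_le_mB {t : List Char} {k : Nat} (h1 : k ≤ t.length - 1) (h2 : t.take k <:+ t) :
    k ≤ pvMB t := Nat.le_findGreatest h1 h2

theorem pv_border_down {t : List Char} {j k : Nat} (hjk : j ≤ k)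
    (hj : t.take j <:+ t) (hk : t.take k <:+ t) : t.take j <:+ t.take k := by
  apply List.suffix_of_suffix_length_le hj hk
  simp
  omega

theorem pv_border_trans {t : List Char} {j k : Nat} (hjk : j ≤ k)
    (hk : t.take k <:+ t) (hj : t.take j <:+ t.take k) : t.take j <:+ t := by
  have h : t.take j = (t.take k).take j := by rw [List.take_take, Nat.min_eq_left hjk]
  exact (h ▸ hj : t.take j <:+ t.take k).trans hk

theorem pv_lt_le_mB_take {t : List Char} {j k : Nat}
    (hj : t.take j <:+ t) (hk : t.take k <:+ t) (hjk : j < k) (hkl : k ≤ t.length) :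
    j ≤ pvMB (t.take k) := by
  apply pv_le_mB
  · simp; omega
  · rw [List.take_take, Nat.min_eq_left hjk.le]
    exact pv_border_down hjk.le hj hk

theorem pv_mB_take_border {t : List Char} {k : Nat} (hk : t.take k <:+ t) :
    t.take (pvMB (t.take k)) <:+ t := by
  have h1 : pvMB (t.take k) ≤ k := by
    have := pvMB_le (t.take k); simp at this; omega
  have h2 : (t.take k).take (pvMB (t.take k)) = t.take (pvMB (t.take k)) := by
    rw [List.take_take, Nat.min_eq_left h1]
  exact pv_border_trans h1 hk (h2 ▸ pvMB_border (t.take k))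

theorem pv_mB_take_lt {t : List Char} {k : Nat} (h0 : 0 < k) (hkl : k ≤ t.length) :
    pvMB (t.take k) < k := by
  have := pvMB_le (t.take k); simp at this; omega

theorem pv_border_snoc {u : List Char} {c : Char} {k : Nat} (hk : k < u.length) :
    ((u ++ [c]).take (k+1) <:+ (u ++ [c])) ↔ (u.take k <:+ u ∧ u.getD k ' ' = c) := by
  have htake : (u ++ [c]).take (k+1) = u.take k ++ [u.getD k ' '] := by
    rw [List.take_append_of_le_length (by omega), List.take_add_one]
    congr 1
    simp [List.getElem?_eq_getElem hk]
  constructor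
  · rintro ⟨w, hw⟩
    rw [htake, ← List.append_assoc] at hw
    obtain ⟨h1, h2⟩ := List.append_inj' hw (by simp)
    exact ⟨⟨w, h1⟩, by simpa using h2⟩
  · rintro ⟨⟨w, hw⟩, hc⟩
    rw [htake, hc]
    exact ⟨w, by rw [← List.append_assoc, hw]⟩

-- shrink loop: finds the longest border r ≤ k of u that is followed by character c (or r = 0)
theorem pvBShrink_spec (s u : List Char) (pi : List Nat) (c : Char)
    (hs : ∀ j, j < u.length → s.getD j ' ' = u.getD j ' ')
    (hpi : ∀ j, 0 < j → j < u.length → pi.getD (j-1) 0 = pvMB (u.take j)) :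
    ∀ fuel k, k ≤ fuel → k < u.length → u.take k <:+ u →
    pvBShrink s pi c fuel k ≤ k ∧ pvBShrink s pi c fuel k < u.length ∧
      u.take (pvBShrink s pi c fuel k) <:+ u ∧
      (pvBShrink s pi c fuel k = 0 ∨ u.getD (pvBShrink s pi c fuel k) ' ' = c) ∧
      (∀ j, j ≤ k → u.take j <:+ u → u.getD j ' ' = c → j ≤ pvBShrink s pi c fuel k) := by
  intro fuel
  induction fuel with
  | zero =>
    intro k hk hkl hb
    have hk0 : k = 0 := Nat.le_zero.mp hk
    subst hk0
    show (0:Nat) ≤ 0 ∧ _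
    exact ⟨Nat.le_refl 0, hkl, hb, Or.inl rfl, fun j hj _ _ => hj⟩
  | succ fuel ih =>
    intro k hk hkl hb
    by_cases hcond : 0 < k ∧ s.getD k ' ' ≠ c
    · have hkpos : 0 < k := hcond.1
      have hkk : k ≤ u.length := hkl.le
      have hk' : pi.getD (k-1) 0 = pvMB (u.take k) := hpi k hkpos hkl
      have hlt : pvMB (u.take k) < k := pv_mB_take_lt hkpos hkk
      have hb' : u.take (pvMB (u.take k)) <:+ u := pv_mB_take_border hb
      have heq : pvBShrink s pi c (fuel+1) k = pvBShrink s pi c fuel (pi.getD (k-1) 0) := by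
        simp only [pvBShrink]
        rw [if_pos hcond]
      rw [heq, hk']
      obtain ⟨r1, r2, r3, r4, r5⟩ := ih (pvMB (u.take k)) (by omega) (by omega) hb'
      refine ⟨by omega, r2, r3, r4, ?_⟩
      intro j hjk hjb hjc
      by_cases hjk2 : j = k
      · exfalso
        apply hcond.2
        subst hjk2
        rw [hs j hkl]
        exact hjc
      · have hjlt : j < k := lt_of_le_of_ne hjk hjk2
        have hjle : j ≤ pvMB (u.take k) := pv_lt_le_mB_take hjb hb hjlt hkk
        exact r5 j hjle hjb hjc
    · have heq : pvBShrink s pi c (fuel+1) k = k := by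
        simp only [pvBShrink]
        rw [if_neg hcond]
      rw [heq]
      refine ⟨Nat.le_refl k, hkl, hb, ?_, fun j hj _ _ => hj⟩
      rcases Nat.eq_zero_or_pos k with h0 | hpos
      · exact Or.inl h0
      · right
        rw [← hs k hkl]
        by_contra hne
        exact hcond ⟨hpos, hne⟩

-- one KMP step computes the longest proper border of u ++ [c]
theorem pvMB_snoc (s u : List Char) (pi : List Nat) (c : Char)
    (hs : ∀ j, j < u.length → s.getD j ' ' = u.getD j ' ')
    (hpi : ∀ j, 0 < j → j < u.length → pi.getD (j-1) 0 = pvMB (u.take j))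
    (hu : u ≠ []) :
    (if c = u.getD (pvBShrink s pi c (pvMB u) (pvMB u)) ' '
     then pvBShrink s pi c (pvMB u) (pvMB u) + 1
     else pvBShrink s pi c (pvMB u) (pvMB u)) = pvMB (u ++ [c]) := by
  have hul : 0 < u.length := List.length_pos_of_ne_nil hu
  have hmlt : pvMB u < u.length := pvMB_lt u hu
  obtain ⟨r1, r2, r3, r4, r5⟩ :=
    pvBShrink_spec s u pi c hs hpi (pvMB u) (pvMB u) (Nat.le_refl _) hmlt (pvMB_border u)
  set r := pvBShrink s pi c (pvMB u) (pvMB u) with hr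
  -- upper bound: every border of u ++ [c] is at most the computed value
  have hub : ∀ M, (u ++ [c]).take M <:+ (u ++ [c]) → M ≤ (u ++ [c]).length - 1 →
      M ≤ (if c = u.getD r ' ' then r + 1 else r) := by
    intro M hM hMle
    rcases Nat.eq_zero_or_pos M with h0 | hMpos
    · omega
    · obtain ⟨j, rfl⟩ : ∃ j, M = j + 1 := ⟨M - 1, by omega⟩
      have hjlt : j < u.length := by simp at hMle; omega
      obtain ⟨hjb, hjc⟩ := (pv_border_snoc hjlt).mp hM
      have hjmb : j ≤ pvMB u := pv_le_mB (by omega) hjb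
      have hjr : j ≤ r := r5 j hjmb hjb hjc
      by_cases hc : c = u.getD r ' '
      · rw [if_pos hc]; omega
      · rw [if_neg hc]
        -- then r = 0 (r4), so j = 0 and u.getD 0 = c contradicts hc
        exfalso
        rcases r4 with h0' | hrc
        · apply hc
          have hj0 : j = 0 := by omega
          rw [h0', ← hj0, hjc]
        · exact hc hrc.symm
  apply Nat.le_antisymm
  · by_cases hc : c = u.getD r ' '
    · rw [if_pos hc]
      apply pv_le_mB
      · simp; omega
      · exact (pv_border_snoc r2).mpr ⟨r3, hc.symm⟩
    · rw [if_neg hc]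
      rcases r4 with h0' | hrc
      · rw [h0']
        exact Nat.zero_le _
      · exact absurd hrc.symm hc
  · exact hub (pvMB (u ++ [c])) (pvMB_border _) (pvMB_le _)

-- fold invariant: the table built so far holds the border lengths of all prefixes
theorem pvBTable_inv (s : List Char) : ∀ j, j + 1 ≤ s.length →
    (((List.range' 1 j).foldl (pvBStep s) ([0], 0)).1.length = j + 1 ∧
     ((List.range' 1 j).foldl (pvBStep s) ([0], 0)).2 = pvMB (s.take (j+1)) ∧
     (∀ r, r < j + 1 →
       ((List.range' 1 j).foldl (pvBStep s) ([0], 0)).1.getD r 0 = pvMB (s.take (r+1)))) := by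
  intro j
  induction j with
  | zero =>
    intro h1
    have hmb : pvMB (s.take 1) = 0 := by
      have := pvMB_le (s.take 1)
      simp at this
      omega
    refine ⟨by simp, by simpa using hmb.symm, ?_⟩
    intro r hr
    interval_cases r
    simpa using hmb.symm
  | succ j ih =>
    intro h1
    obtain ⟨ih1, ih2, ih3⟩ := ih (by omega)
    have hconcat : List.range' 1 (j+1) = List.range' 1 j ++ [j+1] := by
      rw [List.range'_concat]
      simp [Nat.add_comm]
    rw [hconcat, List.foldl_append]
    set st := (List.range' 1 j).foldl (pvBStep s) ([0], 0) with hst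
    -- the prefix processed so far
    set u := s.take (j+1) with hu
    have hulen : u.length = j + 1 := by
      rw [hu, List.length_take]
      omega
    have hune : u ≠ [] := List.ne_nil_of_length_pos (by omega)
    have hs' : ∀ r, r < u.length → s.getD r ' ' = u.getD r ' ' := by
      intro r hr
      rw [hulen] at hr
      rw [List.getD_eq_getElem s ' ' (by omega), List.getD_eq_getElem u ' ' (by rw [hulen]; omega)]
      simp only [hu]
      simp [List.getElem_take]
    have hpi' : ∀ r, 0 < r → r < u.length → st.1.getD (r-1) 0 = pvMB (u.take r) := by
      intro r h0 hr
      rw [hulen] at hr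
      have : u.take r = s.take r := by
        rw [hu, List.take_take, Nat.min_eq_left (by omega)]
      rw [this]
      have := ih3 (r-1) (by omega)
      rw [show r - 1 + 1 = r from by omega] at this
      exact this
    have hsnoc := pvMB_snoc s u st.1 (s.getD (j+1) ' ') hs' hpi' hune
    obtain ⟨r1, r2, r3, r4, r5⟩ :=
      pvBShrink_spec s u st.1 (s.getD (j+1) ' ') hs' hpi' (pvMB u) (pvMB u)
        (Nat.le_refl _) (pvMB_lt u hune) (pvMB_border u)
    have hcstep : s.take (j+1+1) = u ++ [s.getD (j+1) ' '] := by
      rw [List.take_add_one]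
      congr 1
      simp [List.getElem?_eq_getElem (show j + 1 < s.length by omega)]
    -- unfold the step
    simp only [List.foldl_cons, List.foldl_nil]
    rw [show pvBStep s st (j+1) =
        (st.1 ++ [if s.getD (j+1) ' ' = s.getD (pvBShrink s st.1 (s.getD (j+1) ' ') st.2 st.2) ' '
                  then pvBShrink s st.1 (s.getD (j+1) ' ') st.2 st.2 + 1
                  else pvBShrink s st.1 (s.getD (j+1) ' ') st.2 st.2],
         if s.getD (j+1) ' ' = s.getD (pvBShrink s st.1 (s.getD (j+1) ' ') st.2 st.2) ' '
         then pvBShrink s st.1 (s.getD (j+1) ' ') st.2 st.2 + 1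
         else pvBShrink s st.1 (s.getD (j+1) ' ') st.2 st.2) from rfl]
    rw [ih2]
    have hsk1 : s.getD (pvBShrink s st.1 (s.getD (j+1) ' ') (pvMB u) (pvMB u)) ' '
        = u.getD (pvBShrink s st.1 (s.getD (j+1) ' ') (pvMB u) (pvMB u)) ' ' := hs' _ r2
    have hk2 : (if s.getD (j+1) ' ' = s.getD (pvBShrink s st.1 (s.getD (j+1) ' ') (pvMB u) (pvMB u)) ' '
                then pvBShrink s st.1 (s.getD (j+1) ' ') (pvMB u) (pvMB u) + 1
                else pvBShrink s st.1 (s.getD (j+1) ' ') (pvMB u) (pvMB u)) = pvMB (s.take (j+1+1)) := by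
      rw [hcstep, ← hsnoc, hsk1]
    refine ⟨by simp [ih1], hk2, ?_⟩
    intro r hr
    rcases Nat.lt_or_ge r (j+1) with hlt | hge
    · rw [List.getD_append _ _ _ _ (by omega)]
      exact ih3 r hlt
    · have hreq : r = j + 1 := by omega
      have hx : ∀ (x : ℕ), (st.1 ++ [x]).getD (j+1) 0 = x := by
        intro x
        have h := ih1
        have : (st.1 ++ [x]).getD st.1.length 0 = x := by simp
        rwa [h] at this
      rw [hreq, hx]
      exact hk2

theorem pvBTable_getD (s : List Char) (hs : s ≠ []) :
    ∀ j, 0 < j → j ≤ s.length → (pvBTable s).getD (j-1) 0 = pvMB (s.take j) := by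
  intro j hj0 hjle
  have hlen : 0 < s.length := List.length_pos_of_ne_nil hs
  obtain ⟨_, _, h3⟩ := pvBTable_inv s (s.length - 1) (by omega)
  have := h3 (j-1) (by omega)
  rw [show j - 1 + 1 = j from by omega] at this
  unfold pvBTable
  exact this

-- filters of an increasing range agree when the extra elements all fail the predicate
theorem pv_filter_range'_ext (p : Nat → Bool) : ∀ (b a : Nat), a ≤ b →
    (∀ j, a < j → j ≤ b → p j = false) →
    (List.range' 1 b).filter p = (List.range' 1 a).filter p := by
  intro b
  induction b with
  | zero =>
    intro a ha _
    have : a = 0 := by omega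
    rw [this]
  | succ b ihb =>
    intro a ha hf
    by_cases hab : a = b + 1
    · rw [hab]
    · have hab' : a ≤ b := by omega
      have hcon : List.range' 1 (b+1) = List.range' 1 b ++ [b+1] := by
        rw [List.range'_concat]
        simp [Nat.add_comm]
      rw [hcon, List.filter_append]
      have hpb : p (b+1) = false := hf (b+1) (by omega) (Nat.le_refl _)
      simp [hpb]
      exact ihb a hab' (fun j h1 h2 => hf j h1 (by omega))

-- collect loop: the border chain enumerates all borders ≤ k, descending, filtered by < m
theorem pvBCollect_spec (s : List Char) (pi : List Nat) (m : Nat)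
    (hpi : ∀ j, 0 < j → j < s.length → pi.getD (j-1) 0 = pvMB (s.take j)) :
    ∀ fuel k acc, k ≤ fuel → k < s.length → s.take k <:+ s →
    pvBCollect pi m fuel k acc =
      acc ++ ((List.range' 1 k).filter
        (fun j => decide (s.take j <:+ s) && decide (j < m))).reverse := by
  intro fuel
  induction fuel with
  | zero =>
    intro k acc hk _ _
    have : k = 0 := by omega
    subst this
    simp [pvBCollect]
  | succ fuel ih =>
    intro k acc hk hkl hb
    by_cases hk0 : 0 < k
    · have heq : pvBCollect pi m (fuel+1) k acc
          = pvBCollect pi m fuel (pi.getD (k-1) 0) (if k < m then acc ++ [k] else acc) := by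
        simp only [pvBCollect]
        rw [if_pos hk0]
      have hpik : pi.getD (k-1) 0 = pvMB (s.take k) := hpi k hk0 hkl
      have hklt : pvMB (s.take k) < k := pv_mB_take_lt hk0 hkl.le
      have hkb : s.take (pvMB (s.take k)) <:+ s := pv_mB_take_border hb
      rw [heq, hpik]
      rw [ih (pvMB (s.take k)) _ (by omega) (by omega) hkb]
      have hsplit : List.range' 1 k = List.range' 1 (k-1) ++ [k] := by
        rw [show k = (k-1) + 1 from by omega, List.range'_concat]
        simp [Nat.add_comm]
      have hfilt : (List.range' 1 (k-1)).filter
            (fun j => decide (s.take j <:+ s) && decide (j < m))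
          = (List.range' 1 (pvMB (s.take k))).filter
            (fun j => decide (s.take j <:+ s) && decide (j < m)) := by
        apply pv_filter_range'_ext _ (k-1) (pvMB (s.take k)) (by omega)
        intro j h1 h2
        simp only [Bool.and_eq_false_iff, decide_eq_false_iff_not]
        left
        intro hjb
        have : j ≤ pvMB (s.take k) := pv_lt_le_mB_take hjb hb (by omega) hkl.le
        omega
      rw [hsplit, List.filter_append, List.reverse_append, ← hfilt]
      have hkkeep : (List.filter (fun j => decide (s.take j <:+ s) && decide (j < m)) [k])
          = if k < m then [k] else [] := by
        by_cases hkm : k < m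
        · simp [hkm, hb]
        · simp [hkm, hb]
      rw [hkkeep]
      by_cases hkm : k < m
      · simp [hkm]
      · simp [hkm]
    · have hk0' : k = 0 := by omega
      subst hk0'
      simp [pvBCollect]

-- a short prefix of first_pep is a suffix of the sentinel concatenation iff it is a suffix of second_pep
theorem pv_border_concat (f s2 : List Char) (c : Char) {j : Nat}
    (hj1 : j ≤ f.length) (hj2 : j ≤ s2.length) :
    ((f ++ c :: s2).take j <:+ (f ++ c :: s2)) ↔ (f.take j <:+ s2) := by
  have htake : (f ++ c :: s2).take j = f.take j := List.take_append_of_le_length hj1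
  have hs2 : s2 <:+ (f ++ c :: s2) := (List.suffix_cons c s2).trans (List.suffix_append f (c :: s2))
  rw [htake]
  constructor
  · intro h
    apply List.suffix_of_suffix_length_le h hs2
    simp
    omega
  · intro h
    exact h.trans hs2

theorem pv_endswith_decide (a b : List Char) : PySem.Chars.endswith a b = decide (b <:+ a) := by
  rw [Bool.eq_iff_iff]
  simp [PySem.Chars.endswith_iff]

-- A's loop, reduced to a filtered range of overlap lengths
theorem pv_lhs_eq (first_pep second_pep : String) :
    pair_creator first_pep second_pep =
      ((List.range (min first_pep.toList.length second_pep.toList.length - 1)).filter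
        (fun k => decide (first_pep.toList.take (1+k) <:+ second_pep.toList))).map
        (fun (k : Nat) => pvLabel (second_pep.toList.length : Int) (1 + (k : Int))) := by
  simp only [pair_creator]
  rw [PySem.List.foldl_append_if
    (fun i => PySem.Str.endswith second_pep (PySem.Str.slice first_pep none (some i)))
    (fun i => pvLabel (PySem.Str.len second_pep) i)]
  rw [show min (PySem.Str.len first_pep) (PySem.Str.len second_pep)
      = ((min first_pep.toList.length second_pep.toList.length : Nat) : Int) from by
    rw [PySem.Str.len_eq, PySem.Str.len_eq, Nat.cast_min]]
  rw [PySem.List.pyRange_one]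
  rw [show (((min first_pep.toList.length second_pep.toList.length : Nat) : Int) - 1).toNat
      = min first_pep.toList.length second_pep.toList.length - 1 from by omega]
  rw [List.filter_map, List.map_map, List.nil_append]
  have hfc : ∀ k ∈ List.range (min first_pep.toList.length second_pep.toList.length - 1),
      ((fun i => PySem.Str.endswith second_pep (PySem.Str.slice first_pep none (some i))) ∘
        (fun k : Nat => (1:Int) + ↑k)) k
      = decide (first_pep.toList.take (1+k) <:+ second_pep.toList) := by
    intro k _
    simp only [Function.comp]
    rw [PySem.Str.endswith_eq, pv_endswith_decide]
    congr 1
    rw [PySem.Str.toList_slice]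
    rw [show PySem.Chars.slice first_pep.toList none (some ((1:Int) + ↑k))
        = first_pep.toList.take ((1:Int) + (k:Int)).toNat from
      PySem.List.slice_to _ (by omega)]
    rw [show ((1:Int) + (k:Int)).toNat = 1 + k from by omega]
  rw [List.filter_congr hfc]
  apply List.map_congr_left
  intro k _
  simp only [Function.comp]
  rw [PySem.Str.len_eq]

-- B's pipeline, reduced to the same filtered range
theorem pv_rhs_eq (first_pep second_pep : String) :
    pair_creator_alt first_pep second_pep =
      ((List.range (min first_pep.toList.length second_pep.toList.length - 1)).filter
        (fun k => decide (first_pep.toList.take (1+k) <:+ second_pep.toList))).map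
        (fun (k : Nat) => pvLabel (second_pep.toList.length : Int) (1 + (k : Int))) := by
  simp only [pair_creator_alt]
  set F := first_pep.toList with hF
  set S := second_pep.toList with hS
  set t := F ++ '\x00' :: S with ht
  set m := min F.length S.length with hm
  have htlen : t.length = F.length + S.length + 1 := by
    simp [ht]
    omega
  have htne : t ≠ [] := List.ne_nil_of_length_pos (by omega)
  have htab := pvBTable_getD t htne
  have hk0 : (pvBTable t).getD (t.length - 1) 0 = pvMB t := by
    have h := htab t.length (by omega) (Nat.le_refl _)
    rwa [List.take_length] at h
  rw [hk0]
  rw [pvBCollect_spec t (pvBTable t) m (fun j a b => htab j a b.le)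
    (pvMB t) (pvMB t) [] (Nat.le_refl _) (pvMB_lt t htne) (pvMB_border t)]
  rw [List.nil_append, List.reverse_reverse]
  -- the collected chain is exactly the overlap lengths below m
  have hmle : m ≤ t.length - 1 := by omega
  have hq : ∀ j, 0 < j → (decide (t.take j <:+ t) && decide (j < m)) = true →
      j ≤ pvMB t := by
    intro j hj0 hqj
    simp only [Bool.and_eq_true, decide_eq_true_eq] at hqj
    exact pv_le_mB (by omega) hqj.1
  have hext1 : (List.range' 1 (max (pvMB t) (m-1))).filter
        (fun j => decide (t.take j <:+ t) && decide (j < m))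
      = (List.range' 1 (pvMB t)).filter
        (fun j => decide (t.take j <:+ t) && decide (j < m)) := by
    apply pv_filter_range'_ext _ _ _ (Nat.le_max_left _ _)
    intro j h1 h2
    show (decide (t.take j <:+ t) && decide (j < m)) = false
    cases h : (decide (t.take j <:+ t) && decide (j < m)) with
    | false => rfl
    | true =>
      have := hq j (by omega) h
      omega
  have hext2 : (List.range' 1 (max (pvMB t) (m-1))).filter
        (fun j => decide (t.take j <:+ t) && decide (j < m))
      = (List.range' 1 (m-1)).filter
        (fun j => decide (t.take j <:+ t) && decide (j < m)) := by
    apply pv_filter_range'_ext _ _ _ (Nat.le_max_right _ _)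
    intro j h1 h2
    show (decide (t.take j <:+ t) && decide (j < m)) = false
    simp only [Bool.and_eq_false_iff, decide_eq_false_iff_not]
    right
    omega
  rw [← hext1, hext2]
  have hcong : ∀ j ∈ List.range' 1 (m-1),
      (decide (t.take j <:+ t) && decide (j < m))
      = decide (F.take j <:+ S) := by
    intro j hj
    rw [List.mem_range'] at hj
    obtain ⟨i, hi, hij⟩ := hj
    have hjm : j < m := by omega
    have hjf : j ≤ F.length := by omega
    have hjs : j ≤ S.length := by omega
    have hbc : t.take j <:+ t ↔ F.take j <:+ S := by
      rw [ht]
      exact pv_border_concat F S '\x00' hjf hjs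
    simp [hjm, hbc]
  rw [List.filter_congr hcong]
  rw [List.range'_eq_map_range, List.filter_map, List.map_map]
  simp only [Function.comp_def]
  apply List.map_congr_left
  intro x _
  congr 1

-- ===== VERDICT (by name: the statement is the Claim_ definition above) =====
theorem pair_creator_spec : Claim_equal_pair_creator := by
  intro first_pep second_pep _
  unfold Spec_pair_creator
  rw [pv_lhs_eq, pv_rhs_eq]
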